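-- pv_equiv track=rewrite | github.com/essenceD/GB | Lesson_8/HW8_1.py | valid_num
-- ===== SOURCE A (Python) =====
-- def valid_num(date):
--     dd, mm, yyyy = date
--     limits = {'31': [1, 3, 5, 7, 8, 10, 12], '30': [4, 6, 9, 11], '28': [2], '29': [2]}
--     for i in limits.keys():
--         if mm in limits[i]:
--             if 0 < dd <= int(i):
--                 return 'Correct date'
--     return 'Invalid date'
-- ===== SOURCE B (Python) =====
-- def valid_num(date):
--     dd, mm, yyyy = date
--     days = {1: 31, 2: 29, 3: 31, 4: 30, 5: 31, 6: 30,
--             7: 31, 8: 31, 9: 30, 10: 31, 11: 30, 12: 31}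
--     if mm in days and 0 < dd <= days[mm]:
--         return 'Correct date'
--     return 'Invalid date'
-- ===== Notes on version B (the rewrite author's own statement) =====
-- stated objective: simpler
-- what changed: Replaced the scan over day-count buckets (with February matched twice via the '28' and '29' keys) by a single month-to-max-days table and one direct lookup; Feb maps to 29 exactly as A's fall-through yields.
import Mathlib
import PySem

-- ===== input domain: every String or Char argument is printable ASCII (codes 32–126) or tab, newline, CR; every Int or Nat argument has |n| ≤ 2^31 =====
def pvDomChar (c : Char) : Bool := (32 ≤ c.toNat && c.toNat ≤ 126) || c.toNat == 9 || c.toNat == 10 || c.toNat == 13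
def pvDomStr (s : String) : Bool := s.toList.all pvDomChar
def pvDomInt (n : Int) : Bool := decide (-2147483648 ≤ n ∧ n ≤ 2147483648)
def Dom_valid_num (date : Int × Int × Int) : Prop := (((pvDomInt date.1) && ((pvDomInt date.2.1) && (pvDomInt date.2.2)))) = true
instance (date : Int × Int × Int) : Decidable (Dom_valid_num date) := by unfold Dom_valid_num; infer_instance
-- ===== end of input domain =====

-- B replaces A's scan over day-count buckets (with February matched twice, via the '28' and
-- '29' keys) by a single month→max-days table and one direct keyed lookup (simpler).

-- ===== PORT A =====
-- A's for-loop over limits.keys() with its early return, as structural recursion over the key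
-- list; int(i) is PySem.Int.ofStr? (each literal key parses, so the getD 0 fallback never fires).
def validNumLoop (limits : PySem.Dict String (List Int)) (dd mm : Int) :
    List String → Option String
  | [] => none
  | i :: rest =>
      if mm ∈ limits.getD i [] then
        if 0 < dd ∧ dd ≤ (PySem.Int.ofStr? i).getD 0 then some "Correct date"
        else validNumLoop limits dd mm rest
      else validNumLoop limits dd mm rest

def valid_num (date : Int × Int × Int) : String :=
  let dd := date.1
  let mm := date.2.1
  let limits : PySem.Dict String (List Int) := PySem.Dict.mk
    [("31", [1, 3, 5, 7, 8, 10, 12]), ("30", [4, 6, 9, 11]), ("28", [2]), ("29", [2])]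
  match validNumLoop limits dd mm limits.keys with
  | some s => s
  | none => "Invalid date"

-- ===== PORT B =====
def valid_num_alt (date : Int × Int × Int) : String :=
  let dd := date.1
  let mm := date.2.1
  let days : PySem.Dict Int Int := PySem.Dict.mk
    [(1, 31), (2, 29), (3, 31), (4, 30), (5, 31), (6, 30),
     (7, 31), (8, 31), (9, 30), (10, 31), (11, 30), (12, 31)]
  match days.get? mm with
  | some d => if 0 < dd ∧ dd ≤ d then "Correct date" else "Invalid date"
  | none => "Invalid date"

-- ===== PRECONDITION & SPEC =====
def Spec_valid_num (date : Int × Int × Int) (out : String) : Prop := out = valid_num_alt date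
instance (date : Int × Int × Int) (out : String) : Decidable (Spec_valid_num date out) := by unfold Spec_valid_num; infer_instance

-- ===== CLAIM (what is proved, stated in full; the proofs are below) =====
def Claim_equal_valid_num : Prop := ∀ (date : Int × Int × Int), Dom_valid_num date → Spec_valid_num date (valid_num date)

-- ===== LEMMAS AND PROOFS =====

set_option maxHeartbeats 1000000 in
theorem valid_num_eq_alt (dd mm y : Int) :
    valid_num (dd, mm, y) = valid_num_alt (dd, mm, y) := by
  have e31 : PySem.Int.ofStr? "31" = some 31 := by decide
  have e30 : PySem.Int.ofStr? "30" = some 30 := by decide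
  have e28 : PySem.Int.ofStr? "28" = some 28 := by decide
  have e29 : PySem.Int.ofStr? "29" = some 29 := by decide
  by_cases hm : 1 ≤ mm ∧ mm ≤ 12
  · obtain ⟨hlo, hhi⟩ := hm
    interval_cases mm <;>
      simp [valid_num, valid_num_alt, validNumLoop, PySem.Dict.keys_mk,
        PySem.Dict.getD, PySem.Dict.get?, e31, e30, e28, e29] <;>
      split_ifs <;> first | rfl | omega
  · have h31 : mm ∉ ([1, 3, 5, 7, 8, 10, 12] : List Int) := by simp; omega
    have h30 : mm ∉ ([4, 6, 9, 11] : List Int) := by simp; omega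
    have h2 : mm ∉ ([2] : List Int) := by simp; omega
    simp [valid_num, valid_num_alt, validNumLoop, PySem.Dict.keys_mk,
      PySem.Dict.getD, PySem.Dict.get?, h31, h30, h2]
    rw [List.find?_eq_none.mpr (by simp; omega)]
    rfl

-- ===== VERDICT (by name: the statement is the Claim_ definition above) =====
theorem valid_num_spec : Claim_equal_valid_num := by
  intro date _
  obtain ⟨dd, mm, y⟩ := date
  exact valid_num_eq_alt dd mm y
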